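-- pv_equiv track=rewrite | github.com/HEJA100/capstone-logo-selected-modules | 05_LOGO_Variant_Prioritization/my_repro/CADD_local_smoke/01_cadd_indel_local_tfrecord_512.py | kmer_tokenize
-- ===== SOURCE A (Python) =====
-- def kmer_tokenize(int_seq, ngram=3, stride=1):
--     max_vocab = 5 ** ngram
--     out = []
--     for i in range(0, len(int_seq) - ngram + 1, stride):
--         token = 0
--         ok = True
--         for x in int_seq[i:i+ngram]:
--             if x < 0 or x > 4:
--                 ok = False
--                 break
--             token = token * 5 + x
--         out.append(token if ok else 0)
--     return out
-- ===== SOURCE B (Python) =====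
-- def kmer_tokenize(int_seq, ngram=3, stride=1):
--     n = len(int_seq)
--     starts = range(0, n - ngram + 1, stride)
--     res = [0] * n          # res[i] = token of the window starting at i (0 if that window is bad)
--     p1 = 5 ** (ngram - 1)
--     t = 0                  # rolling base-5 value of the last (up to ngram) in-range entries
--     run = 0                # length of the current run of in-range entries
--     for j, x in enumerate(int_seq):
--         if 0 <= x <= 4:
--             t = (t % p1) * 5 + x
--             run += 1
--         else:
--             t = 0
--             run = 0
--         i = j - ngram + 1
--         if i >= 0 and run >= ngram:
--             res[i] = t
--     return [res[i] for i in starts]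
-- ===== Notes on version B (the rewrite author's own statement) =====
-- stated objective: alternative
-- what changed: B replaces A's per-window inner slice scan by a single left-to-right pass that keeps a rolling base-5 value (the leading digit dropped with a mod) and the length of the current run of in-range entries, filling a token-per-start-position table that the stride selection then samples.
-- outside the precondition, e.g. on kmer_tokenize([3], 0, 1): A returns [0, 0], B raises IndexError; on kmer_tokenize([1, 2], -2, 1): A returns [0, 0, 0, 0, 0], B raises IndexError; on kmer_tokenize([1, 2], 5, -1): A returns [7, 2], B returns [0, 0]
import Mathlib
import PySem

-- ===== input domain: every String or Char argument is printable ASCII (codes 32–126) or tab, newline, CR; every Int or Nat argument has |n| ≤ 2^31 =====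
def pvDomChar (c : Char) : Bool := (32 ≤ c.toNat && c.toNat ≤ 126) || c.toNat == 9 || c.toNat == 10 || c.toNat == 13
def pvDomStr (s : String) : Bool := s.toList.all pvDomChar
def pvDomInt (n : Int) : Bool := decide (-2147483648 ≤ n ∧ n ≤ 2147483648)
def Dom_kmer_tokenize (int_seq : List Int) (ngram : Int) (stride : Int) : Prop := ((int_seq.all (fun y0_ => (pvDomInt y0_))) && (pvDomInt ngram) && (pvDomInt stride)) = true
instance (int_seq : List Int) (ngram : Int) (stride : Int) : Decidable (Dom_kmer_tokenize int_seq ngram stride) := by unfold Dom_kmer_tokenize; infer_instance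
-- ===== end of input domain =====

-- B replaces A's per-window inner scan by one linear pass keeping a rolling base-5 value and a
-- run length of consecutive in-range entries (objective: alternative single-pass algorithm).


-- ===== PORT A =====
-- inner loop 'for x in int_seq[i:i+ngram]: …' with its break; state (token, ok)
def kmerInner : List Int → Int → Int × Bool
  | [], token => (token, true)
  | x :: rest, token =>
    if x < 0 ∨ x > 4 then (token, false) else kmerInner rest (token * 5 + x)

-- A computes max_vocab = 5 ** ngram but never uses it; it has no effect on the result
def kmer_tokenize (int_seq : List Int) (ngram : Int) (stride : Int) : List Int :=
  (PySem.List.pyRange 0 ((int_seq.length : Int) - ngram + 1) stride).foldl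
    (fun out i =>
      let r := kmerInner (PySem.List.slice int_seq (some i) (some (i + ngram))) 0
      out ++ [if r.2 then r.1 else 0]) []

-- ===== PORT B =====
-- one step of Source B's loop body: state (res, t, run), element (j, x)
def kmerStep (ngram p1 : Int) (s : List Int × Int × Int) (jx : Int × Int) : List Int × Int × Int :=
  let t' : Int := if 0 ≤ jx.2 ∧ jx.2 ≤ 4 then (PySem.Int.mod s.2.1 p1) * 5 + jx.2 else 0
  let run' : Int := if 0 ≤ jx.2 ∧ jx.2 ≤ 4 then s.2.2 + 1 else 0
  let i : Int := jx.1 - ngram + 1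
  if 0 ≤ i ∧ ngram ≤ run' then (PySem.List.pySetD s.1 i t', t', run') else (s.1, t', run')

def kmer_tokenize_alt (int_seq : List Int) (ngram : Int) (stride : Int) : List Int :=
  let n : Int := (int_seq.length : Int)
  let starts := PySem.List.pyRange 0 (n - ngram + 1) stride
  -- p1 = 5 ** (ngram - 1): exact for ngram ≥ 1 (Pre_; Python would yield a float for ngram ≤ 0, where Source B raises later)
  let p1 : Int := (5:Int) ^ (ngram - 1).toNat
  let st := (PySem.List.enumerate int_seq 0).foldl (kmerStep ngram p1) (List.replicate int_seq.length 0, 0, 0)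
  starts.map (fun i => PySem.List.pyGetD st.1 i 0)

-- ===== PRECONDITION & SPEC =====
-- Pre_ excludes stride = 0 (A raises ValueError at range); nonpositive ngram, where A tokenizes
-- negatively-wrapped Python slices int_seq[i:i+ngram] — an artefact of slice wraparound for a
-- parameter that is nonsense for a k-mer size — and B raises IndexError; and negative stride with
-- ngram > len(int_seq), where range yields negative start positions and A again tokenizes wrapped
-- truncated slices (B raises on empty input and returns a 0 per degenerate window otherwise).
def Pre_kmer_tokenize (int_seq : List Int) (ngram : Int) (stride : Int) : Prop :=
  1 ≤ ngram ∧ (0 < stride ∨ (stride < 0 ∧ ngram ≤ (int_seq.length : Int)))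
instance (int_seq : List Int) (ngram : Int) (stride : Int) : Decidable (Pre_kmer_tokenize int_seq ngram stride) := by unfold Pre_kmer_tokenize; infer_instance

def pvWitness_kmer_tokenize : List Int × Int × Int := ([1, 2, 0, 4, 3], 3, 1)

def Spec_kmer_tokenize (int_seq : List Int) (ngram : Int) (stride : Int) (out : List Int) : Prop := out = kmer_tokenize_alt int_seq ngram stride
instance (int_seq : List Int) (ngram : Int) (stride : Int) (out : List Int) : Decidable (Spec_kmer_tokenize int_seq ngram stride out) := by unfold Spec_kmer_tokenize; infer_instance

-- ===== CLAIM (what is proved, stated in full; the proofs are below) =====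
def Claim_equal_kmer_tokenize : Prop := ∀ (int_seq : List Int) (ngram : Int) (stride : Int), Dom_kmer_tokenize int_seq ngram stride → Pre_kmer_tokenize int_seq ngram stride → Spec_kmer_tokenize int_seq ngram stride (kmer_tokenize int_seq ngram stride)

-- ===== LEMMAS AND PROOFS =====

def isGood (x : Int) : Bool := decide (0 ≤ x ∧ x ≤ 4)

def kval (w : List Int) : Int := w.foldl (fun a x => a * 5 + x) 0

-- the token A emits for a window w
def tokenOf (w : List Int) : Int := if w.all isGood then kval w else 0

-- length of the maximal all-good suffix of the processed prefix
def runLen (ys : List Int) : Nat := (ys.reverse.takeWhile isGood).length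

lemma kval_append (w : List Int) (x : Int) : kval (w ++ [x]) = kval w * 5 + x := by
  simp [kval, List.foldl_append]

lemma foldl_from (t : Int) (w : List Int) :
    w.foldl (fun a x => a * 5 + x) t = t * 5 ^ w.length + kval w := by
  induction w generalizing t with
  | nil => simp [kval]
  | cons y w ih =>
    have hy : kval (y :: w) = y * 5 ^ w.length + kval w := by
      simp only [kval, List.foldl_cons, zero_mul, zero_add]
      exact ih y
    simp only [List.foldl_cons, List.length_cons]
    rw [ih (t * 5 + y), hy]
    ring

lemma kval_cons (y : Int) (w : List Int) : kval (y :: w) = y * 5 ^ w.length + kval w := by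
  simp only [kval, List.foldl_cons, zero_mul, zero_add]
  exact foldl_from y w

lemma kval_nonneg_lt (w : List Int) (h : w.all isGood) :
    0 ≤ kval w ∧ kval w < 5 ^ w.length := by
  induction w with
  | nil => simp [kval]
  | cons y w ih =>
    rw [List.all_cons, Bool.and_eq_true] at h
    have hy : 0 ≤ y ∧ y ≤ 4 := by simpa [isGood] using h.1
    obtain ⟨ih0, ih1⟩ := ih h.2
    have h5 : (0:Int) < 5 ^ w.length := by positivity
    rw [kval_cons]
    constructor
    · nlinarith
    · simp only [List.length_cons, pow_succ]
      nlinarith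

lemma kmerInner_ok (w : List Int) (t : Int) (h : w.all isGood) :
    kmerInner w t = (w.foldl (fun a x => a * 5 + x) t, true) := by
  induction w generalizing t with
  | nil => rfl
  | cons y w ih =>
    rw [List.all_cons, Bool.and_eq_true] at h
    have hy : 0 ≤ y ∧ y ≤ 4 := by simpa [isGood] using h.1
    simp only [kmerInner]
    rw [if_neg (by omega : ¬(y < 0 ∨ y > 4))]
    simpa using ih (t * 5 + y) h.2

lemma kmerInner_bad (w : List Int) (t : Int) (h : ¬ w.all isGood = true) :
    (kmerInner w t).2 = false := by
  induction w generalizing t with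
  | nil => simp at h
  | cons y w ih =>
    rw [List.all_cons, Bool.and_eq_true] at h
    by_cases hy : isGood y = true
    · have hy' : 0 ≤ y ∧ y ≤ 4 := by simpa [isGood] using hy
      simp only [kmerInner]
      rw [if_neg (by omega : ¬(y < 0 ∨ y > 4))]
      exact ih _ (fun hw => h ⟨hy, hw⟩)
    · have hy' : ¬(0 ≤ y ∧ y ≤ 4) := by simpa [isGood] using hy
      simp only [kmerInner]
      rw [if_pos (by omega : (y < 0 ∨ y > 4))]

lemma kmerInner_tokenOf (w : List Int) :
    (if (kmerInner w 0).2 then (kmerInner w 0).1 else 0) = tokenOf w := by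
  by_cases h : w.all isGood
  · rw [kmerInner_ok w 0 h]
    simp [tokenOf, h, kval]
  · rw [tokenOf, if_neg h, kmerInner_bad w 0 h]
    simp

lemma runLen_append (ys : List Int) (x : Int) :
    runLen (ys ++ [x]) = if isGood x then runLen ys + 1 else 0 := by
  simp only [runLen, List.reverse_append, List.reverse_cons, List.reverse_nil, List.nil_append,
    List.singleton_append, List.takeWhile_cons]
  by_cases h : isGood x = true <;> simp [h]

lemma runLen_le (ys : List Int) : runLen ys ≤ ys.length := by
  have h : (ys.reverse.takeWhile isGood).length + (ys.reverse.dropWhile isGood).length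
      = ys.reverse.length := by
    rw [← List.length_append, List.takeWhile_append_dropWhile]
  simp only [runLen]
  simp only [List.length_reverse] at h
  omega

-- the last r ≤ runLen entries of ys are all good
lemma good_suffix (ys : List Int) (r : Nat) (h : r ≤ runLen ys) :
    (ys.drop (ys.length - r)).all isGood := by
  have hr : r ≤ ys.length := le_trans h (runLen_le ys)
  rw [List.all_eq_true]
  intro x hx
  have hx' : x ∈ ys.reverse.take r := by
    have hrev : (ys.drop (ys.length - r)).reverse = ys.reverse.take r := by
      rw [List.reverse_drop]
      congr 1
      omega
    rw [← hrev]
    simpa using hx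
  have hpref : ys.reverse.take r = (ys.reverse.takeWhile isGood).take r := by
    conv_lhs => rw [← List.takeWhile_append_dropWhile (p := isGood) (l := ys.reverse)]
    rw [List.take_append_of_le_length h]
  rw [hpref] at hx'
  exact List.mem_takeWhile_imp (List.mem_of_mem_take hx')

lemma takeWhile_len_ge (p : Int → Bool) : ∀ (l : List Int) (k : Nat), k ≤ l.length →
    (l.take k).all p → k ≤ (l.takeWhile p).length := by
  intro l
  induction l with
  | nil => intro k hk _; simpa using hk
  | cons y l ih =>
    intro k hk hall
    cases k with
    | zero => omega
    | succ k =>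
      simp only [List.take_succ_cons, List.all_cons, Bool.and_eq_true] at hall
      have hlen := ih k (by simpa using hk) hall.2
      simp only [List.takeWhile_cons, hall.1, if_true, List.length_cons]
      omega

-- if the last k entries are all good then runLen ≥ k
lemma runLen_ge (ys : List Int) (k : Nat) (hk : k ≤ ys.length)
    (h : (ys.drop (ys.length - k)).all isGood) : k ≤ runLen ys := by
  apply takeWhile_len_ge isGood ys.reverse k (by simpa using hk)
  have hrev : (ys.drop (ys.length - k)).reverse = ys.reverse.take k := by
    rw [List.reverse_drop]
    congr 1
    omega
  rw [← hrev, List.all_reverse]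
  exact h

lemma getD_set (l : List Int) (n i : Nat) (v : Int) (hn : n < l.length) :
    (l.set n v).getD i 0 = if i = n then v else l.getD i 0 := by
  rw [List.getD_eq_getElem?_getD, List.getD_eq_getElem?_getD, List.getElem?_set]
  by_cases h : i = n
  · subst h
    rw [if_pos rfl, if_pos rfl, if_pos hn]
    rfl
  · rw [if_neg (fun hh => h hh.symm), if_neg h]

-- the invariant carried through Source B's loop, after processing the first m entries
def KInv (xs : List Int) (k m : Nat) (st : List Int × Int × Int) : Prop :=
  st.1.length = xs.length ∧
  st.2.2 = (runLen (xs.take m) : Int) ∧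
  st.2.1 = kval ((xs.take m).drop (m - min (runLen (xs.take m)) k)) ∧
  ∀ i : Nat, st.1.getD i 0 = if i + k ≤ m then tokenOf ((xs.drop i).take k) else 0

lemma window_eq (xs : List Int) (k m : Nat) (hkm : k ≤ m + 1) (_hm : m < xs.length) :
    (xs.take (m+1)).drop (m + 1 - k) = (xs.drop (m + 1 - k)).take k := by
  rw [List.drop_take]
  congr 1
  omega

lemma inv_step (xs : List Int) (k m : Nat) (st : List Int × Int × Int) (x : Int)
    (hk : 1 ≤ k) (hx : xs[m]? = some x) (hinv : KInv xs k m st) :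
    KInv xs k (m + 1) (kmerStep (k : Int) ((5:Int) ^ (k - 1)) st ((m : Int), x)) := by
  obtain ⟨res, t, run⟩ := st
  obtain ⟨hlen, hrun, ht, hres⟩ := hinv
  simp only at hlen hrun ht hres
  have hm : m < xs.length := by
    by_contra hcon
    rw [List.getElem?_eq_none (by omega)] at hx
    simp at hx
  have htake : xs.take (m + 1) = xs.take m ++ [x] := by
    rw [List.take_add_one, hx]
    rfl
  have hlentake : (xs.take m).length = m := by
    rw [List.length_take]; omega
  have hlentake1 : (xs.take (m+1)).length = m + 1 := by
    rw [List.length_take]; omega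
  have hrle : runLen (xs.take m) ≤ m := by
    have := runLen_le (xs.take m); omega
  set r := runLen (xs.take m) with hrdef
  have hp1 : (0:Int) < 5 ^ (k - 1) := by positivity
  -- the old rolling window
  set w := (xs.take m).drop (m - min r k) with hwdef
  have hwgood : w.all isGood := by
    have hg := good_suffix (xs.take m) (min r k) (by omega)
    rw [hlentake] at hg
    exact hg
  have hwlen : w.length = min r k := by
    rw [hwdef, List.length_drop, hlentake]
    omega
  by_cases hgood : 0 ≤ x ∧ x ≤ 4
  · -- in-range entry
    have hgb : isGood x = true := by simpa [isGood] using hgood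
    have hrun1 : runLen (xs.take (m+1)) = r + 1 := by
      rw [htake, runLen_append, if_pos hgb]
    -- value of the new rolling window
    have ht' : PySem.Int.mod t ((5:Int) ^ (k - 1)) * 5 + x
        = kval ((xs.take (m+1)).drop (m + 1 - min (r + 1) k)) := by
      by_cases hk2 : r < k
      · -- run shorter than the window: nothing drops out
        have hmin : min r k = r := by omega
        have hmin' : min (r + 1) k = r + 1 := by omega
        have hbound := kval_nonneg_lt w hwgood
        have hpow : (5:Int) ^ w.length ≤ 5 ^ (k - 1) := by
          rw [hwlen, hmin]
          gcongr
          · norm_num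
          · omega
        have hmod : PySem.Int.mod t ((5:Int) ^ (k - 1)) = t := by
          rw [PySem.Int.mod_eq_emod_of_pos hp1, ht]
          exact Int.emod_eq_of_lt hbound.1 (lt_of_lt_of_le hbound.2 hpow)
        have hweq : (xs.take (m+1)).drop (m + 1 - (r + 1)) = w ++ [x] := by
          rw [htake, List.drop_append_of_le_length (by rw [hlentake]; omega), hwdef, hmin]
          congr 2
          omega
        rw [hmod, ht, ← kval_append, hmin', hweq]
      · -- full window: the leading digit drops out
        have hmin : min r k = k := by omega
        have hmin' : min (r + 1) k = k := by omega
        rw [hmin] at hwlen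
        obtain ⟨d, w'', hw⟩ : ∃ d w'', w = d :: w'' := by
          cases hcase : w with
          | nil => rw [hcase] at hwlen; simp at hwlen; omega
          | cons d w'' => exact ⟨d, w'', rfl⟩
        have hw''len : w''.length = k - 1 := by
          rw [hw] at hwlen; simp at hwlen; omega
        have hw''good : w''.all isGood := by
          rw [hw, List.all_cons, Bool.and_eq_true] at hwgood
          exact hwgood.2
        have hbound := kval_nonneg_lt w'' hw''good
        rw [hw''len] at hbound
        have hmod : PySem.Int.mod t ((5:Int) ^ (k - 1)) = kval w'' := by
          rw [PySem.Int.mod_eq_emod_of_pos hp1, ht, hw, kval_cons, hw''len]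
          rw [add_comm, mul_comm d]
          rw [Int.add_mul_emod_self_left]
          exact Int.emod_eq_of_lt hbound.1 hbound.2
        rw [hmod, ← kval_append, hmin']
        congr 1
        rw [htake, List.drop_append_of_le_length (by rw [hlentake]; omega)]
        have hdrop1 : (xs.take m).drop (m + 1 - k) = w'' := by
          have : (xs.take m).drop (m + 1 - k) = w.drop 1 := by
            rw [hwdef, List.drop_drop, hmin]
            congr 1
            omega
          rw [this, hw]
          rfl
        rw [hdrop1]
    -- now the step itself
    simp only [kmerStep, if_pos hgood]
    split_ifs with hC
    · -- the token is written at position m + 1 - k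
      have hkm1 : k ≤ m + 1 := by
        have := hC.1; omega
      have hkr : k ≤ r + 1 := by
        have := hC.2
        rw [hrun] at this
        omega
      have hminC : min (r + 1) k = k := by omega
      have hidx : ((m:Int) - (k:Int) + 1).toNat = m + 1 - k := by omega
      have hsetlen : m + 1 - k < res.length := by rw [hlen]; omega
      refine ⟨?_, ?_, ?_, ?_⟩
      · simp only [PySem.List.length_pySetD, hlen]
      · simp only [hrun, hrun1]; push_cast; ring
      · show PySem.Int.mod t ((5:Int) ^ (k - 1)) * 5 + x = _
        rw [hrun1]
        exact ht'
      · intro idx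
        simp only [PySem.List.pySetD_of_nonneg _ _ hC.1, hidx]
        rw [getD_set res (m + 1 - k) idx _ hsetlen]
        by_cases hidx2 : idx = m + 1 - k
        · subst hidx2
          rw [if_pos rfl, if_pos (by omega : (m + 1 - k) + k ≤ m + 1)]
          have hwin : (xs.drop (m + 1 - k)).take k = (xs.take (m+1)).drop (m + 1 - k) :=
            (window_eq xs k m hkm1 hm).symm
          have hallw : ((xs.drop (m + 1 - k)).take k).all isGood := by
            rw [hwin]
            have hg := good_suffix (xs.take (m+1)) k (by omega)
            rw [hlentake1] at hg
            exact hg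
          rw [tokenOf, if_pos hallw, hwin, ht', hminC]
        · rw [if_neg hidx2, hres idx]
          split_ifs with h1 h2 h2 <;> first | rfl | omega
    · -- no write
      have hrunval : (if (0:Int) ≤ x ∧ x ≤ 4 then run + 1 else 0) = run + 1 := if_pos hgood
      refine ⟨hlen, ?_, ?_, ?_⟩
      · simp only [hrun, hrun1]; push_cast; ring
      · show PySem.Int.mod t ((5:Int) ^ (k - 1)) * 5 + x = _
        rw [hrun1]
        exact ht'
      · intro idx
        rw [hres idx]
        rcases not_and_or.mp hC with hC1 | hC2
        · -- k > m + 1: no window ends yet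
          have : m + 1 < k := by omega
          split_ifs with h1 h2 h2 <;> first | rfl | omega
        · -- run too short: the window ending here is bad
          have hrk : r + 1 < k := by
            rw [hrun] at hC2
            omega
          split_ifs with h1 h2 h2 <;> try first | rfl | omega
          -- remaining case: idx + k = m + 1, token must be 0
          have hidx3 : idx = m + 1 - k := by omega
          have hkm1 : k ≤ m + 1 := by omega
          rw [tokenOf, if_neg ?_]
          intro hall
          have hwin : (xs.take (m+1)).drop (m + 1 - k) = (xs.drop idx).take k := by
            rw [hidx3]
            exact window_eq xs k m hkm1 hm
          have hgereq : k ≤ runLen (xs.take (m+1)) := by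
            apply runLen_ge (xs.take (m+1)) k (by rw [hlentake1]; omega)
            rw [hlentake1, hwin]
            exact hall
          rw [hrun1] at hgereq
          omega
  · -- out-of-range entry: everything resets
    have hgb : isGood x = false := by
      simp only [isGood, decide_eq_false_iff_not]
      exact hgood
    have hrun1 : runLen (xs.take (m+1)) = 0 := by
      rw [htake, runLen_append, hgb]
      rfl
    simp only [kmerStep, if_neg hgood]
    rw [if_neg (by omega : ¬((0:Int) ≤ (m:Int) - (k:Int) + 1 ∧ (k:Int) ≤ 0))]
    refine ⟨hlen, ?_, ?_, ?_⟩
    · rw [hrun1]; simp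
    · rw [hrun1]
      simp only [Nat.min_eq_left (by omega : 0 ≤ k), Nat.sub_zero]
      rw [List.drop_eq_nil_of_le (by rw [hlentake1])]
      simp [kval]
    · intro idx
      rw [hres idx]
      split_ifs with h1 h2 h2 <;> try first | rfl | omega
      -- idx + k = m + 1 : the window contains x, which is bad
      have hidx3 : idx = m + 1 - k := by omega
      have hkm1 : k ≤ m + 1 := by omega
      rw [tokenOf, if_neg ?_]
      intro hall
      have hxin : x ∈ (xs.drop (m + 1 - k)).take k := by
        rw [← window_eq xs k m hkm1 hm, htake,
          List.drop_append_of_le_length (by rw [hlentake]; omega)]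
        simp
      rw [hidx3] at hall
      rw [List.all_eq_true] at hall
      have hgx := hall x hxin
      rw [hgb] at hgx
      exact absurd hgx (by simp)

lemma inv_fold (xs : List Int) (k : Nat) (hk : 1 ≤ k) :
    ∀ (rest : List Int) (m : Nat) (st : List Int × Int × Int),
      xs.drop m = rest → m ≤ xs.length → KInv xs k m st →
      KInv xs k xs.length ((PySem.List.enumerate rest (m : Int)).foldl
        (kmerStep (k : Int) ((5:Int) ^ (k - 1))) st) := by
  intro rest
  induction rest with
  | nil =>
    intro m st hdrop hle hinv
    have hlen : xs.length - m = 0 := by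
      have := congrArg List.length hdrop
      simpa using this
    have hm : m = xs.length := by omega
    subst hm
    simpa [PySem.List.enumerate_nil] using hinv
  | cons x rest ih =>
    intro m st hdrop hle hinv
    have hx : xs[m]? = some x := by
      have h0 : (xs.drop m)[0]? = some x := by rw [hdrop]; rfl
      rw [List.getElem?_drop] at h0
      simpa using h0
    have hm : m < xs.length := by
      by_contra hcon
      rw [List.getElem?_eq_none (by omega)] at hx
      simp at hx
    rw [PySem.List.enumerate_cons, List.foldl_cons]
    have hstep := inv_step xs k m st x hk hx hinv
    have hdrop' : xs.drop (m + 1) = rest := by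
      have h1 : xs.drop (m + 1) = (xs.drop m).drop 1 := by
        rw [List.drop_drop]
      rw [h1, hdrop]
      rfl
    have hrec := ih (m + 1) _ hdrop' (by omega) hstep
    have hcast : ((m:Int) + 1) = (((m + 1 : Nat)) : Int) := by push_cast; ring
    rw [hcast]
    exact hrec

-- negative step with stop ≥ start: Python's range is empty
lemma pyRange_nil_of_neg (a b s : Int) (hs : s < 0) (hab : a ≤ b) :
    PySem.List.pyRange a b s = [] := by
  simp only [PySem.List.pyRange]
  rw [if_neg (by omega : ¬ s = 0), if_neg (by omega : ¬ 0 < s), if_neg (by omega : ¬ b < a)]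
  simp

-- ===== VERDICT (by name: the statement is the Claim_ definition above) =====
theorem kmer_tokenize_spec : Claim_equal_kmer_tokenize := by
  unfold Claim_equal_kmer_tokenize
  intro xs ngram stride _hdom hpre
  unfold Spec_kmer_tokenize
  obtain ⟨hng, hstr⟩ := hpre
  rcases hstr with hpos | ⟨hneg, hle⟩
  · -- positive stride
    have hkng : ngram = ((ngram.toNat : Nat) : Int) := by omega
    set k := ngram.toNat with hkdef
    have hk1 : 1 ≤ k := by omega
    have hinv0 : KInv xs k 0 (List.replicate xs.length 0, 0, 0) := by
      refine ⟨by simp, by simp [runLen], by simp [runLen, kval], ?_⟩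
      intro i
      rw [if_neg (by omega)]
      rw [List.getD_eq_getElem?_getD]
      by_cases hi : i < xs.length
      · rw [List.getElem?_replicate, if_pos hi]
        rfl
      · rw [List.getElem?_eq_none (by simpa using hi)]
        rfl
    have hfold := inv_fold xs k hk1 xs 0 _ (by simp) (by omega) hinv0
    simp only [Nat.cast_zero] at hfold
    obtain ⟨hlenR, _, _, hresR⟩ := hfold
    have hp1 : (5:Int) ^ (ngram - 1).toNat = (5:Int) ^ (k - 1) := by
      congr 1
      omega
    simp only [kmer_tokenize, kmer_tokenize_alt]
    rw [hp1, hkng]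
    rw [PySem.List.foldl_append_singleton_eq_map]
    rw [List.nil_append]
    apply List.map_congr_left
    intro i hi
    obtain ⟨hi0, hi1, -⟩ := (PySem.List.mem_pyRange_iff_of_pos hpos i).mp hi
    have hislice : PySem.List.slice xs (some i) (some (i + (k:Int))) = (xs.drop i.toNat).take k := by
      rw [PySem.List.slice_toNat xs hi0 (by omega)]
      congr 1
      omega
    rw [hislice, kmerInner_tokenOf]
    have hgd : ∀ (l : List Int), PySem.List.pyGetD l i 0 = l.getD i.toNat 0 := by
      intro l
      conv_lhs => rw [show i = ((i.toNat : Nat) : Int) by omega]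
      rw [PySem.List.pyGetD_natCast]
    rw [hgd, hresR i.toNat, if_pos (by omega : i.toNat + k ≤ xs.length)]
  · -- negative stride (and ngram ≤ len): the range is empty on both sides
    simp only [kmer_tokenize, kmer_tokenize_alt]
    rw [pyRange_nil_of_neg _ _ _ hneg (by omega)]
    rfl
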